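-- pv_equiv track=rewrite | github.com/Phill544/B.Ash | Main Build/Scripts/ByteUtilFunctions.py | HexValsToChars
-- ===== SOURCE A (Python) =====
-- def HexValsToChars(data):
--
--     # Remove any whitespace
--     data = data.replace(" ","")
--
--     # If string begins with '0x' remove it
--     if data.startswith("0x"):
--         data = data[2:]
--
--     converted = ""
--
--     for byte in chunker(data, 2):
--         xHex = int(byte,16)
--         xInt = xHex - 0x7a # 0x7a is the conversion value from pokemon encoding to ASCI
--
--
--         if xHex == 255:
--             break
--
--         #converted += str(hex(xInt)[2:])
--         converted += chr(xInt)
--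
--     return converted
--
-- def chunker(seq, size):
--     return (seq[pos:pos + size] for pos in range(0, len(seq), size))
-- ===== SOURCE B (Python) =====
-- def HexValsToChars(data):
--     s = data.replace(" ", "")
--     if s.startswith("0x"):
--         s = s[2:]
--     end = len(s)
--     for pos in range(0, len(s), 2):
--         if s[pos:pos + 2].lower() == "ff":
--             end = pos
--             break
--     return "".join(chr(b - 0x7a) for b in bytes.fromhex(s[:end]))
-- ===== Notes on version B (the rewrite author's own statement) =====
-- stated objective: idiomatic
-- what changed: Instead of A's single loop that int()-parses each 2-char chunk, breaks on 0xFF and appends chr() per chunk, B first locates the index of the first 'ff' chunk, slices the hex prefix, bulk-decodes it with bytes.fromhex, and maps the -0x7a offset over the byte values.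
import Mathlib
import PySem

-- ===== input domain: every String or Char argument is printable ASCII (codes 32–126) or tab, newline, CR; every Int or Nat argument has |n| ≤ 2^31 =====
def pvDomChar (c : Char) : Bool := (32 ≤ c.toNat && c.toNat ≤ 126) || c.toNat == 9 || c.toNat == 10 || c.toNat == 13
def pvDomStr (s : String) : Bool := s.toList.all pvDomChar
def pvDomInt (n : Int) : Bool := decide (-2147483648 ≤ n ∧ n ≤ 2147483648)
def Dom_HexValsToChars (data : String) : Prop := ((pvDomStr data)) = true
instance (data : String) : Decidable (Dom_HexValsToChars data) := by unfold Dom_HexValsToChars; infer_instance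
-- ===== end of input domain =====

-- B replaces A's per-chunk int()/chr() loop with break by: locate the first 0xFF chunk, slice the
-- hex prefix, bulk-decode it with bytes.fromhex, then map the -0x7a offset over the byte values.

-- ===== PORT A =====
-- the 'for byte in chunker(data, 2)' loop: byte = data[pos:pos+2], xHex = int(byte, 16), break on 255,
-- else converted += chr(xHex - 0x7a).  int() ValueError and chr() ValueError (negative argument) are
-- excluded by Pre_; there the port simply stops with the accumulator.
def HexAloop (s : List Char) : List Int → List Char → List Char
  | [], conv => conv
  | pos :: rest, conv =>
    match PySem.Int.ofCharsBase? (PySem.List.slice s (some pos) (some (pos + 2))) 16 with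
    | none => conv
    | some xHex =>
      if xHex = 255 then conv
      else HexAloop s rest (conv ++ [Char.ofNat (xHex - 122).toNat])  -- chr(xInt), exact for 0 ≤ xInt (guaranteed by Pre_)

def HexValsToChars (data : String) : String :=
  let d1 := PySem.Str.replace data " " ""
  let d2 := if PySem.Str.startswith d1 "0x" then PySem.Str.slice d1 (some 2) none else d1
  String.ofList (HexAloop d2.toList (PySem.List.pyRange 0 (PySem.Str.len d2) 2) [])

-- ===== PORT B =====
-- 'end = len(s); for pos in range(0, len(s), 2): if s[pos:pos+2].lower() == "ff": end = pos; break'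
def HexBend (s : List Char) : List Int → Int
  | [] => PySem.List.len s
  | pos :: rest =>
    if PySem.Chars.lower (PySem.List.slice s (some pos) (some (pos + 2))) = ['f', 'f'] then pos
    else HexBend s rest

-- hand port of bytes.fromhex (CPython 3.11): ASCII whitespace is skipped between byte pairs, then
-- each pair of hex digits becomes one byte value; anything else is none = ValueError.  Exact on
-- printable-ASCII input (the only whitespace reachable here is tab/newline/CR, all in Chars.isspace).
def HexBfromhex : List Char → Option (List Nat)
  | [] => some []
  | a :: rest =>
    if PySem.Chars.isspace a then HexBfromhex rest
    else
      match rest with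
      | [] => none
      | b :: rest' =>
        match PySem.Int.digitVal? a, PySem.Int.digitVal? b, HexBfromhex rest' with
        | some da, some db, some bs => if da < 16 ∧ db < 16 then some ((16 * da + db) :: bs) else none
        | _, _, _ => none

def HexValsToChars_alt (data : String) : String :=
  let s1 := PySem.Str.replace data " " ""
  let s2 := if PySem.Str.startswith s1 "0x" then PySem.Str.slice s1 (some 2) none else s1
  let e := HexBend s2.toList (PySem.List.pyRange 0 (PySem.Str.len s2) 2)
  match HexBfromhex (PySem.List.slice s2.toList none (some e)) with
  | none => ""  -- bytes.fromhex ValueError, excluded by Pre_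
  | some bs => String.ofList (bs.map fun (b : Nat) => Char.ofNat ((b : Int) - 122).toNat)  -- chr(b - 0x7a)

-- ===== PRECONDITION & SPEC =====
def pvHexDigit (c : Char) : Bool :=
  decide ((48 ≤ c.toNat ∧ c.toNat ≤ 57) ∨ (97 ≤ c.toNat ∧ c.toNat ≤ 102) ∨
          (65 ≤ c.toNat ∧ c.toNat ≤ 70))

def pvHexVal (c : Char) : Nat :=
  if c ≤ '9' then c.toNat - 48 else if c ≤ 'F' then c.toNat - 55 else c.toNat - 87

-- the string A actually iterates over: spaces removed, a leading "0x" stripped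
def pvClean (data : String) : List Char :=
  let l := PySem.Chars.replace data.toList [' '] []
  if PySem.Chars.startswith l ['0', 'x'] then PySem.List.slice l (some 2) none else l

-- every 2-char chunk up to and including the first one of value 0xFF must be two hex digits with
-- value ≥ 0x7a (a smaller value makes chr() raise, a non-hex chunk makes int() raise), and an odd
-- trailing chunk is only allowed after a 0xFF chunk
def pvGoodHex : List Char → Bool
  | [] => true
  | [_] => false
  | a :: b :: rest =>
    pvHexDigit a && pvHexDigit b &&
      (if 16 * pvHexVal a + pvHexVal b = 255 then true
       else decide (122 ≤ 16 * pvHexVal a + pvHexVal b) && pvGoodHex rest)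

-- Pre_ holds exactly where the Python A returns normally (elsewhere int() or chr() raises ValueError)
def Pre_HexValsToChars (data : String) : Prop := pvGoodHex (pvClean data) = true
instance (data : String) : Decidable (Pre_HexValsToChars data) := by
  unfold Pre_HexValsToChars; infer_instance

def pvWitness_HexValsToChars : String := "dc 7bff9a"

def Spec_HexValsToChars (data : String) (out : String) : Prop := out = HexValsToChars_alt data
instance (data : String) (out : String) : Decidable (Spec_HexValsToChars data out) := by
  unfold Spec_HexValsToChars; infer_instance

-- ===== CLAIM (what is proved, stated in full; the proofs are below) =====
def Claim_equal_HexValsToChars : Prop :=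
  ∀ (data : String), Dom_HexValsToChars data → Pre_HexValsToChars data →
    Spec_HexValsToChars data (HexValsToChars data)

-- ===== LEMMAS AND PROOFS =====

-- the 22 hex-digit characters
def pvHexChars : List Char := "0123456789abcdefABCDEF".toList

theorem pvHexDigit_mem {c : Char} (h : pvHexDigit c = true) : c ∈ pvHexChars := by
  have h' : (48 ≤ c.toNat ∧ c.toNat ≤ 57) ∨ (97 ≤ c.toNat ∧ c.toNat ≤ 102) ∨
      (65 ≤ c.toNat ∧ c.toNat ≤ 70) := by simpa [pvHexDigit] using h
  have hc : Char.ofNat c.toNat = c := Char.ofNat_toNat c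
  rw [← hc]
  set n := c.toNat with hn
  clear_value n
  rcases h' with ⟨h1, h2⟩ | ⟨h1, h2⟩ | ⟨h1, h2⟩ <;> interval_cases n <;> decide

-- one kernel evaluation over all 22×22 digit pairs: int(chunk, 16) parses to 16*hi+lo, and
-- chunk.lower() == "ff" exactly when that value is 255
set_option maxRecDepth 8000 in
theorem pvPairTable :
    (pvHexChars.all fun a => pvHexChars.all fun b =>
      (PySem.Int.ofCharsBase? [a, b] 16 == some ((16 * pvHexVal a + pvHexVal b : Nat) : Int)) &&
      ((PySem.Chars.lower [a, b] == ['f', 'f']) == (16 * pvHexVal a + pvHexVal b == 255))) = true := by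
  decide

set_option maxRecDepth 8000 in
theorem pvDigitTable :
    (pvHexChars.all fun c =>
      (PySem.Int.digitVal? c == some (pvHexVal c)) && decide (pvHexVal c < 16) &&
        !PySem.Chars.isspace c) = true := by
  decide

theorem pvParsePair {a b : Char} (ha : pvHexDigit a = true) (hb : pvHexDigit b = true) :
    PySem.Int.ofCharsBase? [a, b] 16 = some ((16 * pvHexVal a + pvHexVal b : Nat) : Int) ∧
    (PySem.Chars.lower [a, b] = ['f', 'f'] ↔ 16 * pvHexVal a + pvHexVal b = 255) := by
  have t := pvPairTable
  rw [List.all_eq_true] at t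
  have t1 := t a (pvHexDigit_mem ha)
  rw [List.all_eq_true] at t1
  have t2 := t1 b (pvHexDigit_mem hb)
  simp only [Bool.and_eq_true, beq_iff_eq, beq_eq_beq] at t2
  exact t2

theorem pvDigitVal {c : Char} (h : pvHexDigit c = true) :
    PySem.Int.digitVal? c = some (pvHexVal c) ∧ pvHexVal c < 16 ∧
      PySem.Chars.isspace c = false := by
  have t := pvDigitTable
  rw [List.all_eq_true] at t
  have t1 := t c (pvHexDigit_mem h)
  simp only [Bool.and_eq_true, beq_iff_eq, decide_eq_true_eq, Bool.not_eq_eq_eq_not,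
    Bool.not_true] at t1
  exact ⟨t1.1.1, t1.1.2, t1.2⟩

-- reference forms of the two loops, recursing chunkwise on the cleaned character list
def pvRefA : List Char → List Char
  | [] => []
  | a :: rest =>
    match PySem.Int.ofCharsBase? ((a :: rest).take 2) 16 with
    | none => []
    | some x => if x = 255 then [] else Char.ofNat (x - 122).toNat :: pvRefA (rest.drop 1)
  termination_by t => t.length
  decreasing_by simp

def pvRefEnd : List Char → Nat
  | [] => 0
  | a :: rest =>
    if PySem.Chars.lower ((a :: rest).take 2) = ['f', 'f'] then 0
    else min 2 (rest.length + 1) + pvRefEnd (rest.drop 1)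
  termination_by t => t.length
  decreasing_by simp

theorem pvRange_two_cons (a b : Int) (h : a < b) :
    PySem.List.pyRange a b 2 = a :: PySem.List.pyRange (a + 2) b 2 := by
  rw [PySem.List.pyRange_of_pos _ _ (by norm_num : (0:Int) < 2),
      PySem.List.pyRange_of_pos _ _ (by norm_num : (0:Int) < 2)]
  by_cases h2 : a + 2 < b
  · rw [if_pos h, if_pos h2]
    have hc : ((b - a + 2 - 1) / 2).toNat = ((b - (a + 2) + 2 - 1) / 2).toNat + 1 := by omega
    rw [hc, List.range_succ_eq_map]
    simp only [List.map_cons, List.map_map]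
    congr 1
    · simp
    · apply List.map_congr_left
      intro k _
      simp [Function.comp, Nat.succ_eq_add_one]
      ring
  · rw [if_pos h, if_neg h2]
    have hc : ((b - a + 2 - 1) / 2).toNat = 1 := by omega
    rw [hc]
    simp

theorem pvSlice2 (s : List Char) (p : Nat) :
    PySem.List.slice s (some (p : Int)) (some ((p : Int) + 2)) = (s.drop p).take 2 := by
  have h := PySem.List.slice_natCast_add s p 2
  simpa using h

theorem pvRange_two_nil (p b : Int) (h : b ≤ p) : PySem.List.pyRange p b 2 = [] := by
  rw [PySem.List.pyRange_of_pos _ _ (by norm_num : (0:Int) < 2), if_neg (by omega)]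
  simp

theorem pvAloop_eq (s : List Char) (p : Nat) (conv : List Char) :
    HexAloop s (PySem.List.pyRange p s.length 2) conv = conv ++ pvRefA (s.drop p) := by
  have H : ∀ (n p : Nat) (conv : List Char), s.length - p ≤ n →
      HexAloop s (PySem.List.pyRange p s.length 2) conv = conv ++ pvRefA (s.drop p) := by
    intro n
    induction n with
    | zero =>
      intro p conv hp
      have hpl : s.length ≤ p := by omega
      rw [pvRange_two_nil _ _ (by exact_mod_cast hpl)]
      simp [HexAloop, List.drop_eq_nil_iff.mpr hpl, pvRefA]
    | succ n ih =>
      intro p conv hp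
      by_cases hpl : p < s.length
      · rw [pvRange_two_cons _ _ (by exact_mod_cast hpl)]
        have hdd : s.drop (p + 2) = (s.drop p).drop 2 := by
          rw [List.drop_drop]
        obtain ⟨a, ts, ht⟩ : ∃ a ts, s.drop p = a :: ts := by
          cases hd : s.drop p with
          | nil => exact absurd (List.drop_eq_nil_iff.mp hd) (by omega)
          | cons a ts => exact ⟨a, ts, rfl⟩
        have hcast : ((p : Int) + 2) = (((p + 2 : Nat)) : Int) := by push_cast; ring
        rw [show HexAloop s ((p : Int) :: PySem.List.pyRange ((p : Int) + 2) (s.length : Int) 2) conv =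
              (match PySem.Int.ofCharsBase? (PySem.List.slice s (some (p : Int)) (some ((p : Int) + 2))) 16 with
               | none => conv
               | some xHex =>
                 if xHex = 255 then conv
                 else HexAloop s (PySem.List.pyRange ((p : Int) + 2) (s.length : Int) 2)
                        (conv ++ [Char.ofNat (xHex - 122).toNat])) from rfl]
        rw [pvSlice2, ht]
        rw [show pvRefA (a :: ts) =
              (match PySem.Int.ofCharsBase? ((a :: ts).take 2) 16 with
               | none => []
               | some x => if x = 255 then []
                 else Char.ofNat (x - 122).toNat :: pvRefA (ts.drop 1)) from by rw [pvRefA]]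
        cases hx : PySem.Int.ofCharsBase? ((a :: ts).take 2) 16 with
        | none => simp
        | some x =>
          by_cases hx255 : x = 255
          · simp [hx255]
          · simp only [if_neg hx255]
            rw [hcast, ih (p + 2) (conv ++ [Char.ofNat (x - 122).toNat]) (by omega)]
            rw [hdd, ht]
            simp
      · rw [pvRange_two_nil _ _ (by exact_mod_cast not_lt.mp hpl)]
        simp [HexAloop, List.drop_eq_nil_iff.mpr (not_lt.mp hpl), pvRefA]
  exact H (s.length - p) p conv le_rfl

theorem pvBend_eq (s : List Char) (p : Nat) (hp : p ≤ s.length) :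
    HexBend s (PySem.List.pyRange p s.length 2) = (p : Int) + pvRefEnd (s.drop p) := by
  have H : ∀ (n p : Nat), p ≤ s.length → s.length - p ≤ n →
      HexBend s (PySem.List.pyRange p s.length 2) = (p : Int) + pvRefEnd (s.drop p) := by
    intro n
    induction n with
    | zero =>
      intro p hple hz
      have hpl : s.length = p := by omega
      rw [pvRange_two_nil _ _ (by exact_mod_cast Nat.le_of_eq hpl)]
      simp [HexBend, List.drop_eq_nil_iff.mpr hpl.le, pvRefEnd, hpl]
    | succ n ih =>
      intro p hple hz
      by_cases hpl : p < s.length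
      · rw [pvRange_two_cons _ _ (by exact_mod_cast hpl)]
        obtain ⟨a, ts, ht⟩ : ∃ a ts, s.drop p = a :: ts := by
          cases hd : s.drop p with
          | nil => exact absurd (List.drop_eq_nil_iff.mp hd) (by omega)
          | cons a ts => exact ⟨a, ts, rfl⟩
        have hlen : s.length = p + 1 + ts.length := by
          have := congrArg List.length ht
          simp at this
          omega
        rw [show HexBend s ((p : Int) :: PySem.List.pyRange ((p : Int) + 2) (s.length : Int) 2) =
              (if PySem.Chars.lower (PySem.List.slice s (some (p : Int)) (some ((p : Int) + 2))) = ['f', 'f']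
               then (p : Int)
               else HexBend s (PySem.List.pyRange ((p : Int) + 2) (s.length : Int) 2)) from rfl]
        rw [pvSlice2, ht]
        rw [show pvRefEnd (a :: ts) =
              (if PySem.Chars.lower ((a :: ts).take 2) = ['f', 'f'] then 0
               else min 2 (ts.length + 1) + pvRefEnd (ts.drop 1)) from by rw [pvRefEnd]]
        by_cases hff : PySem.Chars.lower ((a :: ts).take 2) = ['f', 'f']
        · rw [if_pos hff, if_pos hff]
          simp
        · rw [if_neg hff, if_neg hff]
          cases ts with
          | nil =>
            have hlen1 : s.length = p + 1 := by simpa using hlen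
            rw [pvRange_two_nil _ _ (by exact_mod_cast (by omega : s.length ≤ p + 2))]
            simp [HexBend, pvRefEnd, hlen1]
          | cons b ts' =>
            have hlen2 : s.length = p + 2 + ts'.length := by
              have h' := hlen
              simp at h'
              omega
            have hcast : ((p : Int) + 2) = (((p + 2 : Nat)) : Int) := by push_cast; ring
            rw [hcast, ih (p + 2) (by omega) (by omega)]
            have hdd : s.drop (p + 2) = ts' := by
              rw [show p + 2 = (p + 1) + 1 from rfl, ← List.drop_drop, ← List.drop_drop]
              rw [show s.drop p = a :: b :: ts' from ht]
              rfl
            rw [hdd]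
            simp
            ring
      · have hpl' : s.length = p := by omega
        rw [pvRange_two_nil _ _ (by exact_mod_cast Nat.le_of_eq hpl')]
        simp [HexBend, List.drop_eq_nil_iff.mpr hpl'.le, pvRefEnd, hpl']
  exact H (s.length - p) p hp le_rfl

theorem pvCore (t : List Char) (h : pvGoodHex t = true) :
    ∃ bs, HexBfromhex (t.take (pvRefEnd t)) = some bs ∧
      bs.map (fun (b : Nat) => Char.ofNat ((b : Int) - 122).toNat) = pvRefA t := by
  have H : ∀ (n : Nat) (t : List Char), t.length ≤ n → pvGoodHex t = true →
      ∃ bs, HexBfromhex (t.take (pvRefEnd t)) = some bs ∧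
        bs.map (fun (b : Nat) => Char.ofNat ((b : Int) - 122).toNat) = pvRefA t := by
    intro n
    induction n with
    | zero =>
      intro t ht _
      have htn : t = [] := List.eq_nil_of_length_eq_zero (by omega)
      subst htn
      exact ⟨[], by simp [pvRefEnd, HexBfromhex], by simp [pvRefA]⟩
    | succ n ih =>
      intro t ht h
      match t with
      | [] => exact ⟨[], by simp [pvRefEnd, HexBfromhex], by simp [pvRefA]⟩
      | [a] => simp [pvGoodHex] at h
      | a :: b :: rest =>
        rw [show pvGoodHex (a :: b :: rest) = (pvHexDigit a && pvHexDigit b &&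
              (if 16 * pvHexVal a + pvHexVal b = 255 then true
               else decide (122 ≤ 16 * pvHexVal a + pvHexVal b) && pvGoodHex rest))
            from by rw [pvGoodHex]] at h
        simp only [Bool.and_eq_true] at h
        obtain ⟨⟨ha, hb⟩, hrest⟩ := h
        obtain ⟨hparse, hiff⟩ := pvParsePair ha hb
        obtain ⟨hda, hda16, hsp⟩ := pvDigitVal ha
        obtain ⟨hdb, hdb16, -⟩ := pvDigitVal hb
        rw [show pvRefA (a :: b :: rest) =
              (match PySem.Int.ofCharsBase? ((a :: b :: rest).take 2) 16 with
               | none => []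
               | some x => if x = 255 then []
                 else Char.ofNat (x - 122).toNat :: pvRefA ((b :: rest).drop 1))
            from by rw [pvRefA]]
        rw [show pvRefEnd (a :: b :: rest) =
              (if PySem.Chars.lower ((a :: b :: rest).take 2) = ['f', 'f'] then 0
               else min 2 ((b :: rest).length + 1) + pvRefEnd ((b :: rest).drop 1))
            from by rw [pvRefEnd]]
        rw [show (a :: b :: rest).take 2 = [a, b] from rfl, hparse]
        by_cases h255 : 16 * pvHexVal a + pvHexVal b = 255
        · rw [if_pos (hiff.mpr h255)]
          refine ⟨[], by simp [HexBfromhex], ?_⟩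
          simp [h255]
        · rw [if_neg (fun hc => h255 (hiff.mp hc))]
          rw [if_neg h255] at hrest
          simp only [Bool.and_eq_true, decide_eq_true_eq] at hrest
          obtain ⟨h122, hg⟩ := hrest
          obtain ⟨bs, hbs, hmap⟩ := ih rest (by simp at ht; omega) hg
          refine ⟨(16 * pvHexVal a + pvHexVal b) :: bs, ?_, ?_⟩
          · rw [show min 2 ((b :: rest).length + 1) = 2 from by simp]
            rw [show (a :: b :: rest).take (2 + pvRefEnd ((b :: rest).drop 1)) =
                  a :: b :: rest.take (pvRefEnd rest) from by
                rw [show 2 + pvRefEnd ((b :: rest).drop 1) = pvRefEnd rest + 2 from by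
                  simp [Nat.add_comm]]
                simp [List.take_succ_cons]]
            rw [show HexBfromhex (a :: b :: rest.take (pvRefEnd rest)) =
                  (if PySem.Chars.isspace a then HexBfromhex (b :: rest.take (pvRefEnd rest))
                   else
                     match PySem.Int.digitVal? a, PySem.Int.digitVal? b,
                           HexBfromhex (rest.take (pvRefEnd rest)) with
                     | some da, some db, some bs' =>
                       if da < 16 ∧ db < 16 then some ((16 * da + db) :: bs') else none
                     | _, _, _ => none) from by rw [HexBfromhex]]
            rw [if_neg (by rw [hsp]; exact Bool.false_ne_true)]
            rw [hda, hdb, hbs]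
            simp [hda16, hdb16]
          · have hne : ((16 * pvHexVal a + pvHexVal b : Nat) : Int) ≠ 255 := by
              exact_mod_cast fun hc => h255 (by exact_mod_cast hc)
            simp only [List.map_cons, hmap, if_neg hne]
            rfl
  exact H t.length t le_rfl h

theorem pvClean_toList (data : String) :
    (if PySem.Str.startswith (PySem.Str.replace data " " "") "0x"
     then PySem.Str.slice (PySem.Str.replace data " " "") (some 2) none
     else PySem.Str.replace data " " "").toList = pvClean data := by
  have h1 : (PySem.Str.replace data " " "").toList = PySem.Chars.replace data.toList [' '] [] := by
    rw [PySem.Str.toList_replace]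
    congr 1
  have h2 : PySem.Str.startswith (PySem.Str.replace data " " "") "0x" =
      PySem.Chars.startswith (PySem.Chars.replace data.toList [' '] []) ['0', 'x'] := by
    rw [PySem.Str.startswith_eq, h1]
    congr 1
  simp only [pvClean]
  by_cases h : PySem.Chars.startswith (PySem.Chars.replace data.toList [' '] []) ['0', 'x']
  · rw [if_pos (h2.trans h), if_pos h]
    rw [PySem.Str.toList_slice, PySem.Chars.slice_eq_listSlice, h1]
  · rw [if_neg (fun hc => h (h2.symm.trans hc)), if_neg h, h1]

-- ===== VERDICT (by name: the statement is the Claim_ definition above) =====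
theorem HexValsToChars_spec : Claim_equal_HexValsToChars := by
  unfold Claim_equal_HexValsToChars
  intro data _ pre
  unfold Spec_HexValsToChars HexValsToChars HexValsToChars_alt
  dsimp only
  set d2 := if PySem.Str.startswith (PySem.Str.replace data " " "") "0x"
      then PySem.Str.slice (PySem.Str.replace data " " "") (some 2) none
      else PySem.Str.replace data " " "" with hd2
  have hclean : d2.toList = pvClean data := pvClean_toList data
  clear_value d2
  unfold Pre_HexValsToChars at pre
  rw [← hclean] at pre
  have hA : HexAloop d2.toList (PySem.List.pyRange 0 ((d2.toList.length : Nat) : Int) 2) [] =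
      pvRefA d2.toList := by
    have h := pvAloop_eq d2.toList 0 []
    simp only [Nat.cast_zero, List.drop_zero, List.nil_append] at h
    exact h
  have hB : HexBend d2.toList (PySem.List.pyRange 0 ((d2.toList.length : Nat) : Int) 2) =
      ((pvRefEnd d2.toList : Nat) : Int) := by
    have h := pvBend_eq d2.toList 0 (by omega)
    simp only [Nat.cast_zero, List.drop_zero, zero_add] at h
    exact h
  have hS : PySem.List.slice d2.toList none (some ((pvRefEnd d2.toList : Nat) : Int)) =
      d2.toList.take (pvRefEnd d2.toList) := by
    rw [PySem.List.slice_to _ (by positivity)]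
    rw [Int.toNat_natCast]
  obtain ⟨bs, hbs, hmap⟩ := pvCore d2.toList pre
  rw [PySem.Str.len_eq, hA, hB, hS, hbs, ← hmap]
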